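-- pv_equiv track=rewrite | github.com/Aasthaengg/IBMdataset | Python_codes/p03147/s264261896.py | garden
-- ===== SOURCE A (Python) =====
-- def garden(a,h):
--     if len(a)==0:
--         return 0
--     if len(a)==1:
--         return a[0]-h
--     m=min(a)
--     i=a.index(m)
--     return m-h+garden(a[:i],m)+garden(a[i+1:],m)
-- ===== SOURCE B (Python) =====
-- def garden(a, h):
--     if not a:
--         return 0
--     total = a[0] - h
--     for prev, cur in zip(a, a[1:]):
--         if cur > prev:
--             total += cur - prev
--     return total
-- ===== Notes on version B (the rewrite author's own statement) =====
-- stated objective: faster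
-- what changed: Replaced the recursive min-split (repeated min/index/slice over sublists) by a single left-to-right pass summing a[0]-h plus the positive adjacent differences.
import Mathlib
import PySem

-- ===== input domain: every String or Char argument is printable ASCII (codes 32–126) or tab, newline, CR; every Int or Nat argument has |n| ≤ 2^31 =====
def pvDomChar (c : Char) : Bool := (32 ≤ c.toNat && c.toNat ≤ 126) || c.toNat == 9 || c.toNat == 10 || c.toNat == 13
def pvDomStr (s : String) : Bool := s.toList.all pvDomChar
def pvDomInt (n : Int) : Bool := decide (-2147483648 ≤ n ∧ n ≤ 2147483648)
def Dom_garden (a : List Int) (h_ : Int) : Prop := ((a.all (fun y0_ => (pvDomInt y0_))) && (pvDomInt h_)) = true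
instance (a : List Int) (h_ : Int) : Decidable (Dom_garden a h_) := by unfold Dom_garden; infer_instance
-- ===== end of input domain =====

-- B replaces A's O(n^2) recursive min-split by one O(n) pass adding a[0]-h plus the positive adjacent differences.

-- ===== PORT A =====
-- literal transliteration of A's recursion: min, first index, slice left/right, recurse
def garden (a : List Int) (h_ : Int) : Int :=
  if a.length = 0 then 0
  else if a.length = 1 then (PySem.List.pyGet? a 0).getD 0 - h_
  else
    match hm : PySem.List.min? a (fun x => x) with
    | none => 0  -- unreachable: a is nonempty here
    | some m =>
      match hi : PySem.List.index? a m with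
      | none => 0  -- unreachable: m ∈ a
      | some i =>
        m - h_ + garden (PySem.List.slice a none (some (i : Int))) m
               + garden (PySem.List.slice a (some ((i : Int) + 1)) none) m
termination_by a.length
decreasing_by
  · rw [PySem.List.slice_to_natCast]
    have := PySem.List.getElem_of_index?_eq_some hi
    obtain ⟨hk, _⟩ := this
    simp [List.length_take]; omega
  · have : ((i : Int) + 1) = (((i + 1 : Nat) : Int)) := by push_cast; ring
    rw [this, PySem.List.slice_from_natCast]
    simp [List.length_drop]; omega

-- ===== PORT B =====
-- literal transliteration of Source B: a[0]-h, then one pass over zip(a, a[1:])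
def garden_alt (a : List Int) (h_ : Int) : Int :=
  match a with
  | [] => 0
  | x :: t =>
      (List.zip (x :: t) t).foldl
        (fun total p => if p.2 > p.1 then total + (p.2 - p.1) else total)
        (x - h_)

-- ===== PRECONDITION & SPEC =====
def Spec_garden (a : List Int) (h_ : Int) (out : Int) : Prop := out = garden_alt a h_
instance (a : List Int) (h_ : Int) (out : Int) : Decidable (Spec_garden a h_ out) := by unfold Spec_garden; infer_instance

-- ===== CLAIM (what is proved, stated in full; the proofs are below) =====
def Claim_equal_garden : Prop := ∀ (a : List Int) (h_ : Int), Dom_garden a h_ → Spec_garden a h_ (garden a h_)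

-- ===== LEMMAS AND PROOFS =====

-- sum of positive adjacent differences
def pvS : List Int → Int
  | x :: y :: t => (if y > x then y - x else 0) + pvS (y :: t)
  | _ => 0

-- closed form shared by both proofs
def pvG (a : List Int) (h_ : Int) : Int :=
  match a with
  | [] => 0
  | x :: t => x - h_ + pvS (x :: t)

theorem pvFold_eq (t : List Int) (x acc : Int) :
    (List.zip (x :: t) t).foldl
      (fun total p => if p.2 > p.1 then total + (p.2 - p.1) else total) acc
    = acc + pvS (x :: t) := by
  induction t generalizing x acc with
  | nil => simp [pvS]
  | cons y t ih =>
      simp only [List.zip_cons_cons, List.foldl_cons, ih, pvS]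
      split_ifs <;> ring

theorem garden_alt_eq_pvG (a : List Int) (h_ : Int) : garden_alt a h_ = pvG a h_ := by
  cases a with
  | nil => rfl
  | cons x t => simp [garden_alt, pvG, pvFold_eq]

theorem pvS_append (xs : List Int) (y : Int) (ys : List Int) :
    pvS (xs ++ y :: ys) = pvS (xs ++ [y]) + pvS (y :: ys) := by
  induction xs with
  | nil => simp [pvS]
  | cons x xs ih =>
      cases xs with
      | nil => simp [pvS]
      | cons x2 xs2 =>
          simp only [List.cons_append, pvS] at *
          omega

theorem pvS_append_min (l : List Int) (m : Int) (hl : ∀ y ∈ l, m ≤ y) :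
    pvS (l ++ [m]) = pvS l := by
  induction l with
  | nil => rfl
  | cons x l ih =>
      cases l with
      | nil =>
          have hx : m ≤ x := hl x (by simp)
          simp [pvS]; omega
      | cons x2 l2 =>
          have ih' := ih (fun y hy => hl y (by simp at hy ⊢; tauto))
          simp only [List.cons_append, pvS] at *
          omega

theorem pvG_split (pre suf : List Int) (m h_ : Int)
    (hmin : ∀ y ∈ pre ++ m :: suf, m ≤ y) :
    pvG (pre ++ m :: suf) h_ = m - h_ + pvG pre m + pvG suf m := by
  cases pre with
  | nil =>
      cases suf with
      | nil => simp [pvG, pvS]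
      | cons s0 suf' =>
          have hs : m ≤ s0 := hmin s0 (by simp)
          simp only [List.nil_append, pvG, pvS]
          split_ifs <;> omega
  | cons p0 pre' =>
      have hmin' : ∀ y ∈ (p0 :: pre'), m ≤ y := fun y hy => hmin y (by simp at hy ⊢; tauto)
      simp only [List.cons_append, pvG]
      have h1 : pvS (p0 :: (pre' ++ m :: suf)) = pvS ((p0 :: pre') ++ [m]) + pvS (m :: suf) := by
        simpa using pvS_append (p0 :: pre') m suf
      rw [h1, pvS_append_min (p0 :: pre') m hmin']
      cases suf with
      | nil => simp [pvS]; ring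
      | cons s0 suf' =>
          have hs : m ≤ s0 := hmin s0 (by simp)
          simp only [pvS]
          split_ifs <;> omega

theorem garden_eq_pvG : ∀ (n : Nat) (a : List Int) (h_ : Int), a.length ≤ n → garden a h_ = pvG a h_ := by
  intro n
  induction n with
  | zero =>
      intro a h_ hl
      have : a = [] := List.length_eq_zero_iff.mp (Nat.le_zero.mp hl)
      subst this; simp [garden, pvG]
  | succ n ih =>
      intro a h_ hl
      rw [garden]
      split_ifs with h0 h1
      · have : a = [] := List.length_eq_zero_iff.mp h0
        subst this; simp [pvG]
      · obtain ⟨x, hx⟩ := List.length_eq_one_iff.mp h1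
        subst hx
        simp [PySem.List.pyGet?, PySem.List.pyIdx?, pvG, pvS]
      · split
        · next hm =>
            exact absurd ((PySem.List.min?_eq_none_iff _ _).mp hm)
              (fun he => h0 (by simp [he]))
        · next m hm =>
          split
          · next hi =>
              have hmem : m ∈ a := PySem.List.min?_mem hm
              exact absurd ((PySem.List.index?_eq_none_iff _ _).mp hi) (fun h => h hmem)
          · next i hi =>
              obtain ⟨pre, suf, hsplit, hlen, _⟩ := (PySem.List.index?_eq_some_iff _ _ _).mp hi
              have hmin : ∀ y ∈ a, m ≤ y := PySem.List.min?_isMin hm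
              have hpre : PySem.List.slice a none (some (i : Int)) = pre := by
                rw [PySem.List.slice_to_natCast, hsplit, ← hlen, List.take_left]
              have hsuf : PySem.List.slice a (some ((i : Int) + 1)) none = suf := by
                have hc : ((i : Int) + 1) = (((i + 1 : Nat) : Int)) := by push_cast; ring
                rw [hc, PySem.List.slice_from_natCast, hsplit, ← hlen]
                simp
              rw [hpre, hsuf]
              have hla : a.length = pre.length + suf.length + 1 := by
                simp [hsplit]; omega
              have e1 : garden pre m = pvG pre m := ih pre m (by omega)
              have e2 : garden suf m = pvG suf m := ih suf m (by omega)
              rw [e1, e2, hsplit, pvG_split pre suf m h_ (hsplit ▸ hmin)]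

-- ===== VERDICT (by name: the statement is the Claim_ definition above) =====
theorem garden_spec : Claim_equal_garden := by
  intro a h_ _
  unfold Spec_garden
  rw [garden_alt_eq_pvG]
  exact garden_eq_pvG a.length a h_ le_rfl
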